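-- pv_equiv track=rewrite | github.com/Scott-Larsen/LeetCode | 5690-ClosestDessertCost.py | closestCost
-- ===== SOURCE A (Python) =====
-- from typing import List
--
-- def closestCost(
--     baseCosts: List[int], toppingCosts: List[int], target: int
-- ) -> int:
--     combos = set(baseCosts)
--     for topping in toppingCosts:
--         cmbs = list(combos)
--         for c in cmbs:
--             combos.add(topping + c)
--             combos.add(2 * topping + c)
--     if target in combos:
--         return target
--     i = 1
--     while i <= target:
--         if target - i in combos:
--             return target - i
--         elif target + i in combos:
--             return target + i
--         i += 1
--     return min(baseCosts)
-- ===== SOURCE B (Python) =====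
-- from typing import List
--
-- def closestCost(
--     baseCosts: List[int], toppingCosts: List[int], target: int
-- ) -> int:
--     costs = set(baseCosts)
--     for t in toppingCosts:
--         costs = {c + k * t for c in costs for k in (0, 1, 2)}
--     return min(costs, key=lambda c: (abs(c - target), c))
-- ===== Notes on version B (the rewrite author's own statement) =====
-- stated objective: idiomatic
-- what changed: B builds the reachable cost set level by level with a set comprehension over 0/1/2 copies of each topping and returns min(costs, key=(abs(c-target), c)) directly, replacing A's mutate-while-snapshotting set construction and its O(target) outward membership scan from target; Pre_ admits the natural domain of nonnegative costs plus any input with a base cost inside A's scan range [0, 2*target], excluding empty baseCosts (both raise ValueError) and negative-cost inputs whose reachable costs may all escape A's target-bounded scan, where A falls back to min(baseCosts).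
-- outside the precondition, e.g. on closestCost([5], [-3], 0): A returns 5, B returns -1; on closestCost([-9], [3], 16): A returns -9, B returns -3; on closestCost([], [1], 3): A raises ValueError, B raises ValueError
import Mathlib
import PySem

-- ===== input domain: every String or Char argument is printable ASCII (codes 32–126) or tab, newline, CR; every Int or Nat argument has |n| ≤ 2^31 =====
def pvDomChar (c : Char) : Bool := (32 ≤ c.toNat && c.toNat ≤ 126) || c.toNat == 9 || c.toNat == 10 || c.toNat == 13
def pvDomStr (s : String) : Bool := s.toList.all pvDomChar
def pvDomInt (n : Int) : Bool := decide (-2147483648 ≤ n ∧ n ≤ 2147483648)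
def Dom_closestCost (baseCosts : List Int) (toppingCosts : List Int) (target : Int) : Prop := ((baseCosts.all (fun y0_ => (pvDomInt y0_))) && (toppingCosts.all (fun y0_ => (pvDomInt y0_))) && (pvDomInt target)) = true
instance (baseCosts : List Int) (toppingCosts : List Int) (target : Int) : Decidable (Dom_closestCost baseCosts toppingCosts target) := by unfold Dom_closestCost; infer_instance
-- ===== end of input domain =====

-- B rebuilds the reachable cost set level by level (0/1/2 copies of each topping) and takes
-- min by the key (abs(c-target), c), replacing A's snapshot-mutation loop and outward scan
-- (objective: idiomatic; no speed claim).

-- ===== PORT A =====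
-- combos = set(baseCosts); for topping: cmbs = list(combos); for c in cmbs: add topping+c, 2*topping+c
def pvStepA (topping : Int) (s : PySem.Set Int) : PySem.Set Int :=
  s.foldl (fun s' c => PySem.Set.add (PySem.Set.add s' (topping + c)) (2 * topping + c)) s

def pvCombosA (baseCosts : List Int) (toppingCosts : List Int) : PySem.Set Int :=
  toppingCosts.foldl (fun s topping => pvStepA topping s) (PySem.Set.ofList baseCosts)

-- the 'i = 1; while i <= target' outward scan; falls through to min(baseCosts)
-- (min([]) raises ValueError in Python: excluded by Pre_, '.getD 0' is never reached there)
def pvScanA (s : PySem.Set Int) (baseCosts : List Int) (target : Int) (i : Int) : Int :=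
  if i ≤ target then
    if PySem.Set.contains s (target - i) then target - i
    else if PySem.Set.contains s (target + i) then target + i
    else pvScanA s baseCosts target (i + 1)
  else (PySem.List.min? baseCosts (fun x => x)).getD 0
termination_by (target + 1 - i).toNat
decreasing_by omega

def closestCost (baseCosts : List Int) (toppingCosts : List Int) (target : Int) : Int :=
  let combos := pvCombosA baseCosts toppingCosts
  if PySem.Set.contains combos target then target
  else pvScanA combos baseCosts target 1

-- ===== PORT B =====
-- costs = set(baseCosts); for t: costs = {c + k*t for c in costs for k in (0,1,2)};
-- return min(costs, key=lambda c: (abs(c-target), c)).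
-- On empty baseCosts Python B raises ValueError at min (empty set): excluded by Pre_, '.getD 0' is never reached there.
def pvCostsB (baseCosts : List Int) (toppingCosts : List Int) : PySem.Set Int :=
  toppingCosts.foldl
    (fun costs t => PySem.Set.ofList (costs.flatMap (fun c => [0, 1, 2].map (fun k => c + k * t))))
    (PySem.Set.ofList baseCosts)

def closestCost_alt (baseCosts : List Int) (toppingCosts : List Int) (target : Int) : Int :=
  (PySem.List.min2? (pvCostsB baseCosts toppingCosts) (fun c => |c - target|) (fun c => c)).getD 0

-- ===== PRECONDITION & SPEC =====
-- Pre_ admits the problem's natural domain — nonnegative base and topping costs (prices) — and,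
-- beyond it, any input with a base cost inside A's scan range [0, 2*target]. It excludes empty
-- baseCosts, on which both programs raise ValueError at min(), and inputs with negative costs
-- whose reachable costs may all lie outside A's target-bounded scan, where A falls back to
-- min(baseCosts) instead of the closest cost, which B does not reproduce.
def Pre_closestCost (baseCosts : List Int) (toppingCosts : List Int) (target : Int) : Prop :=
  baseCosts ≠ [] ∧
    (((∀ b ∈ baseCosts, 0 ≤ b) ∧ (∀ t ∈ toppingCosts, 0 ≤ t)) ∨
      ∃ b ∈ baseCosts, 0 ≤ b ∧ b ≤ 2 * target)

instance (baseCosts : List Int) (toppingCosts : List Int) (target : Int) : Decidable (Pre_closestCost baseCosts toppingCosts target) := by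
  unfold Pre_closestCost; infer_instance

def pvWitness_closestCost : List Int × List Int × Int := ([1, 7], [3], 10)

def Spec_closestCost (baseCosts : List Int) (toppingCosts : List Int) (target : Int) (out : Int) : Prop := out = closestCost_alt baseCosts toppingCosts target
instance (baseCosts : List Int) (toppingCosts : List Int) (target : Int) (out : Int) : Decidable (Spec_closestCost baseCosts toppingCosts target out) := by unfold Spec_closestCost; infer_instance

-- ===== CLAIM (what is proved, stated in full; the proofs are below) =====
def Claim_equal_closestCost : Prop := ∀ (baseCosts : List Int) (toppingCosts : List Int) (target : Int), Dom_closestCost baseCosts toppingCosts target → Pre_closestCost baseCosts toppingCosts target → Spec_closestCost baseCosts toppingCosts target (closestCost baseCosts toppingCosts target)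

-- ===== LEMMAS AND PROOFS =====

-- all sums cost + Σ kᵢ·tᵢ, kᵢ ∈ {0,1,2}
def pvSums (ts : List Int) (c : Int) : List Int :=
  match ts with
  | [] => [c]
  | t :: r => pvSums r c ++ pvSums r (c + t) ++ pvSums r (c + 2 * t)

def pvF (tgt b c : Int) : Int :=
  if |c - tgt| < |b - tgt| ∨ (|c - tgt| = |b - tgt| ∧ c < b) then c else b

def pvUpd (tgt : Int) (best : Option Int) (c : Int) : Option Int :=
  some (match best with | none => c | some b => pvF tgt b c)

def pvLe (tgt a c : Int) : Prop := |a - tgt| < |c - tgt| ∨ (|a - tgt| = |c - tgt| ∧ a ≤ c)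

theorem pvLe_trans (tgt a b c : Int) (h1 : pvLe tgt a b) (h2 : pvLe tgt b c) : pvLe tgt a c := by
  simp only [pvLe, Int.abs_eq_natAbs] at *; omega

theorem pvF_le_left (tgt b c : Int) : pvLe tgt (pvF tgt b c) b := by
  simp only [pvF, pvLe, Int.abs_eq_natAbs]; split <;> omega

theorem pvF_le_right (tgt b c : Int) : pvLe tgt (pvF tgt b c) c := by
  simp only [pvF, pvLe, Int.abs_eq_natAbs]; split <;> omega

theorem pvF_mem (tgt b c : Int) : pvF tgt b c = b ∨ pvF tgt b c = c := by
  simp only [pvF]; split <;> simp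

theorem foldl_pvF_spec (tgt : Int) (tl : List Int) : ∀ b : Int,
    (tl.foldl (pvF tgt) b = b ∨ tl.foldl (pvF tgt) b ∈ tl) ∧
    pvLe tgt (tl.foldl (pvF tgt) b) b ∧ ∀ c ∈ tl, pvLe tgt (tl.foldl (pvF tgt) b) c := by
  induction tl with
  | nil => intro b; refine ⟨Or.inl rfl, ?_, by simp⟩; simp [pvLe]
  | cons x tl ih =>
    intro b
    obtain ⟨hmem, hle, hall⟩ := ih (pvF tgt b x)
    simp only [List.foldl_cons]
    refine ⟨?_, ?_, ?_⟩
    · rcases hmem with h | h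
      · rcases pvF_mem tgt b x with h' | h'
        · exact Or.inl (h.trans h')
        · exact Or.inr (by rw [h, h']; exact List.mem_cons_self)
      · exact Or.inr (List.mem_cons_of_mem x h)
    · exact pvLe_trans _ _ _ _ hle (pvF_le_left tgt b x)
    · intro c hc
      rcases List.mem_cons.mp hc with rfl | hc
      · exact pvLe_trans _ _ _ _ hle (pvF_le_right tgt b c)
      · exact hall c hc

theorem foldl_upd_some (tgt : Int) (L : List Int) : ∀ b : Int,
    L.foldl (pvUpd tgt) (some b) = some (L.foldl (pvF tgt) b) := by
  induction L with
  | nil => intro b; rfl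
  | cons x L ih => intro b; simp only [List.foldl_cons, pvUpd, ih]

theorem foldl_fun_congr {α β : Type} (f g : β → α → β) (h : ∀ a x, f a x = g a x) :
    ∀ (L : List α) (acc : β), L.foldl f acc = L.foldl g acc := by
  intro L
  induction L with
  | nil => intro acc; rfl
  | cons x L ih => intro acc; simp only [List.foldl_cons, h, ih]

-- min with the tuple key (abs(c-target), c) is the foldl of pvUpd
theorem min2?_abs_eq (tgt : Int) (L : List Int) :
    PySem.List.min2? L (fun c => |c - tgt|) (fun c => c) = L.foldl (pvUpd tgt) none := by
  unfold PySem.List.min2?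
  refine foldl_fun_congr _ _ ?_ L none
  intro acc x
  cases acc with
  | none => rfl
  | some m =>
    simp only [pvUpd, pvF]
    split <;> split <;> first
      | rfl
      | (rename_i h1 h2
         exfalso
         simp only [Bool.or_eq_true, Bool.and_eq_true, Bool.not_eq_eq_eq_not, Bool.not_true,
           decide_eq_true_eq, decide_eq_false_iff_not, Int.abs_eq_natAbs] at h1 h2
         omega)

theorem self_mem_sums (ts : List Int) : ∀ c : Int, c ∈ pvSums ts c := by
  induction ts with
  | nil => intro c; simp [pvSums]
  | cons t r ih =>
    intro c
    simp only [pvSums, List.mem_append]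
    exact Or.inl (Or.inl (ih c))

-- with nonnegative toppings, every sum is at least its starting cost
theorem sums_ge (ts : List Int) (hts : ∀ t ∈ ts, 0 ≤ t) : ∀ c v, v ∈ pvSums ts c → c ≤ v := by
  induction ts with
  | nil => intro c v hv; simp [pvSums] at hv; omega
  | cons t r ih =>
    intro c v hv
    have ht : 0 ≤ t := hts t List.mem_cons_self
    have hr : ∀ t' ∈ r, 0 ≤ t' := fun t' h => hts t' (List.mem_cons_of_mem t h)
    simp only [pvSums, List.mem_append] at hv
    rcases hv with (h | h) | h
    · exact ih hr c v h
    · have := ih hr (c + t) v h; omega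
    · have := ih hr (c + 2 * t) v h; omega

-- membership of A's inner snapshot loop
theorem mem_stepA_fold (topping : Int) (cl : List Int) : ∀ (s : PySem.Set Int) (v : Int),
    v ∈ cl.foldl (fun s' c => PySem.Set.add (PySem.Set.add s' (topping + c)) (2 * topping + c)) s ↔
      v ∈ s ∨ ∃ c ∈ cl, v = topping + c ∨ v = 2 * topping + c := by
  induction cl with
  | nil => intro s v; simp
  | cons c cl ih =>
    intro s v
    simp only [List.foldl_cons, ih, PySem.Set.mem_add, List.mem_cons]
    constructor
    · rintro (((h | h) | h) | ⟨c', hc', h⟩)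
      · exact Or.inl h
      · exact Or.inr ⟨c, Or.inl rfl, Or.inl h⟩
      · exact Or.inr ⟨c, Or.inl rfl, Or.inr h⟩
      · exact Or.inr ⟨c', Or.inr hc', h⟩
    · rintro (h | ⟨c', hc' | hc', h⟩)
      · exact Or.inl (Or.inl (Or.inl h))
      · subst hc'; rcases h with h | h
        · exact Or.inl (Or.inl (Or.inr h))
        · exact Or.inl (Or.inr h)
      · exact Or.inr ⟨c', hc', h⟩

theorem mem_combos_fold (tsl : List Int) : ∀ (s : PySem.Set Int) (v : Int),
    v ∈ tsl.foldl (fun s t => pvStepA t s) s ↔ ∃ c ∈ s, v ∈ pvSums tsl c := by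
  induction tsl with
  | nil =>
    intro s v
    simp only [List.foldl_nil, pvSums, List.mem_singleton]
    constructor
    · intro h; exact ⟨v, h, rfl⟩
    · rintro ⟨c, hc, rfl⟩; exact hc
  | cons t r ih =>
    intro s v
    rw [List.foldl_cons, ih (pvStepA t s) v]
    constructor
    · rintro ⟨c, hc, hv⟩
      unfold pvStepA at hc
      rw [mem_stepA_fold] at hc
      rcases hc with hc | ⟨c0, hc0, hc | hc⟩
      · exact ⟨c, hc, by simp only [pvSums, List.mem_append]; exact Or.inl (Or.inl hv)⟩
      · subst hc
        rw [add_comm t c0] at hv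
        exact ⟨c0, hc0, by simp only [pvSums, List.mem_append]; exact Or.inl (Or.inr hv)⟩
      · subst hc
        rw [add_comm (2 * t) c0] at hv
        exact ⟨c0, hc0, by simp only [pvSums, List.mem_append]; exact Or.inr hv⟩
    · rintro ⟨c, hc, hv⟩
      simp only [pvSums, List.mem_append] at hv
      have hmem : ∀ w : Int, (w ∈ s ∨ ∃ c0 ∈ s, w = t + c0 ∨ w = 2 * t + c0) → w ∈ pvStepA t s := by
        intro w hw
        unfold pvStepA
        rw [mem_stepA_fold]
        exact hw
      rcases hv with (hv | hv) | hv
      · exact ⟨c, hmem c (Or.inl hc), hv⟩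
      · exact ⟨c + t, hmem (c + t) (Or.inr ⟨c, hc, Or.inl (add_comm c t)⟩), hv⟩
      · exact ⟨c + 2 * t, hmem (c + 2 * t) (Or.inr ⟨c, hc, Or.inr (add_comm c (2 * t))⟩), hv⟩

theorem mem_combosA (base ts : List Int) (v : Int) :
    v ∈ pvCombosA base ts ↔ v ∈ base.flatMap (pvSums ts) := by
  simp only [pvCombosA, mem_combos_fold, PySem.Set.mem_ofList, List.mem_flatMap]

-- membership of B's level-wise comprehension rebuild
theorem mem_costsB_fold (tsl : List Int) : ∀ (s : PySem.Set Int) (v : Int),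
    v ∈ tsl.foldl
        (fun costs t => PySem.Set.ofList (costs.flatMap (fun c => [0, 1, 2].map (fun k => c + k * t)))) s
      ↔ ∃ c ∈ s, v ∈ pvSums tsl c := by
  induction tsl with
  | nil =>
    intro s v
    simp only [List.foldl_nil, pvSums, List.mem_singleton]
    constructor
    · intro h; exact ⟨v, h, rfl⟩
    · rintro ⟨c, hc, rfl⟩; exact hc
  | cons t r ih =>
    intro s v
    rw [List.foldl_cons, ih _ v]
    constructor
    · rintro ⟨c, hc, hv⟩
      rw [PySem.Set.mem_ofList, List.mem_flatMap] at hc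
      obtain ⟨c0, hc0, hcf⟩ := hc
      simp only [List.map_cons, List.map_nil, List.mem_cons, List.not_mem_nil, or_false] at hcf
      rcases hcf with h | h | h
      · refine ⟨c0, hc0, ?_⟩
        simp only [pvSums, List.mem_append]
        exact Or.inl (Or.inl (by rw [show c0 = c by omega]; exact hv))
      · refine ⟨c0, hc0, ?_⟩
        simp only [pvSums, List.mem_append]
        exact Or.inl (Or.inr (by rw [show c0 + t = c by omega]; exact hv))
      · refine ⟨c0, hc0, ?_⟩
        simp only [pvSums, List.mem_append]
        exact Or.inr (by rw [show c0 + 2 * t = c by omega]; exact hv)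
    · rintro ⟨c, hc, hv⟩
      simp only [pvSums, List.mem_append] at hv
      have hmem : ∀ w : Int, (∃ k ∈ ([0, 1, 2] : List Int), w = c + k * t) →
          w ∈ PySem.Set.ofList (s.flatMap (fun c => [0, 1, 2].map (fun k => c + k * t))) := by
        intro w hw
        rw [PySem.Set.mem_ofList, List.mem_flatMap]
        obtain ⟨k, hk, rfl⟩ := hw
        exact ⟨c, hc, List.mem_map.mpr ⟨k, hk, rfl⟩⟩
      rcases hv with (hv | hv) | hv
      · exact ⟨c, hmem c ⟨0, by simp, by omega⟩, hv⟩
      · exact ⟨c + t, hmem (c + t) ⟨1, by simp, by omega⟩, hv⟩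
      · exact ⟨c + 2 * t, hmem (c + 2 * t) ⟨2, by simp, by omega⟩, hv⟩

theorem mem_costsB (base ts : List Int) (v : Int) :
    v ∈ pvCostsB base ts ↔ v ∈ base.flatMap (pvSums ts) := by
  simp only [pvCostsB, mem_costsB_fold, PySem.Set.mem_ofList, List.mem_flatMap]

-- A's final selection, applied to the lexicographic minimum m of all combination costs
def pvSelect (base : List Int) (tgt m : Int) : Int :=
  if m = tgt ∨ (0 ≤ m ∧ m ≤ 2 * tgt) then m
  else (PySem.List.min? base (fun x => x)).getD 0

-- A's outward scan computes pvSelect of the lexicographic minimum m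
theorem scanA_go (base ts : List Int) (tgt m : Int)
    (hm_mem : m ∈ base.flatMap (pvSums ts))
    (hm_min : ∀ c ∈ base.flatMap (pvSums ts), pvLe tgt m c)
    (htgtL : tgt ∉ base.flatMap (pvSums ts)) :
    ∀ (fuel : Nat) (i : Int), (tgt + 1 - i).toNat ≤ fuel → 1 ≤ i → i ≤ |m - tgt| →
      pvScanA (pvCombosA base ts) base tgt i = pvSelect base tgt m := by
  intro fuel
  induction fuel with
  | zero =>
    intro i hfuel h1 h2
    have hi : ¬ i ≤ tgt := by omega
    rw [pvScanA, if_neg hi]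
    have hne : m ≠ tgt := fun h => htgtL (h ▸ hm_mem)
    unfold pvSelect
    rw [if_neg ?_]
    intro hsel
    rcases hsel with h | h
    · exact hne h
    · simp only [Int.abs_eq_natAbs] at h2; omega
  | succ fuel ih =>
    intro i hfuel h1 h2
    rw [pvScanA]
    by_cases hi : i ≤ tgt
    · rw [if_pos hi]
      by_cases hlo : PySem.Set.contains (pvCombosA base ts) (tgt - i) = true
      · rw [if_pos hlo]
        have hmemL : tgt - i ∈ base.flatMap (pvSums ts) := by
          rw [← mem_combosA]; exact (PySem.Set.contains_iff _ _).mp hlo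
        have hle := hm_min _ hmemL
        have hmval : m = tgt - i := by
          simp only [pvLe, Int.abs_eq_natAbs] at hle h2; omega
        unfold pvSelect
        rw [if_pos (Or.inr (by omega))]
        omega
      · rw [if_neg hlo]
        have hloL : tgt - i ∉ base.flatMap (pvSums ts) := by
          intro h
          exact hlo ((PySem.Set.contains_iff _ _).mpr ((mem_combosA base ts _).mpr h))
        by_cases hhi : PySem.Set.contains (pvCombosA base ts) (tgt + i) = true
        · rw [if_pos hhi]
          have hmemL : tgt + i ∈ base.flatMap (pvSums ts) := by
            rw [← mem_combosA]; exact (PySem.Set.contains_iff _ _).mp hhi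
          have hle := hm_min _ hmemL
          have hne : m ≠ tgt - i := fun h => hloL (h ▸ hm_mem)
          have hmval : m = tgt + i := by
            simp only [pvLe, Int.abs_eq_natAbs] at hle h2; omega
          unfold pvSelect
          rw [if_pos (Or.inr (by omega))]
          omega
        · rw [if_neg hhi]
          have hhiL : tgt + i ∉ base.flatMap (pvSums ts) := by
            intro h
            exact hhi ((PySem.Set.contains_iff _ _).mpr ((mem_combosA base ts _).mpr h))
          have hne1 : m ≠ tgt - i := fun h => hloL (h ▸ hm_mem)
          have hne2 : m ≠ tgt + i := fun h => hhiL (h ▸ hm_mem)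
          refine ih (i + 1) (by omega) (by omega) ?_
          have : |m - tgt| ≠ i := by
            intro h
            have : m = tgt - i ∨ m = tgt + i := by
              simp only [Int.abs_eq_natAbs] at h; omega
            tauto
          omega
    · rw [if_neg hi]
      have hne : m ≠ tgt := fun h => htgtL (h ▸ hm_mem)
      unfold pvSelect
      rw [if_neg ?_]
      intro hsel
      rcases hsel with h | h
      · exact hne h
      · simp only [Int.abs_eq_natAbs] at h2; omega

-- on the nonnegative domain, A's selection of the lexicographic minimum m IS m
theorem select_eq_min (base ts : List Int) (tgt m : Int)
    (hbase : ∀ b ∈ base, 0 ≤ b) (hts : ∀ t ∈ ts, 0 ≤ t)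
    (hm_mem : m ∈ base.flatMap (pvSums ts))
    (hm_min : ∀ c ∈ base.flatMap (pvSums ts), pvLe tgt m c) :
    pvSelect base tgt m = m := by
  unfold pvSelect
  by_cases hwin : m = tgt ∨ (0 ≤ m ∧ m ≤ 2 * tgt)
  · rw [if_pos hwin]
  · rw [if_neg hwin]
    obtain ⟨b0, hb0, hmb0⟩ := List.mem_flatMap.mp hm_mem
    have hm0 : 0 ≤ m := le_trans (hbase b0 hb0) (sums_ge ts hts b0 m hmb0)
    have hmbig : 2 * tgt < m := by
      by_contra h
      exact hwin (Or.inr ⟨hm0, by omega⟩)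
    -- every reachable cost exceeds 2*tgt, so the lexicographic order is the value order
    have hall : ∀ c ∈ base.flatMap (pvSums ts), m ≤ c := by
      intro c hc
      have hle := hm_min c hc
      obtain ⟨bc, hbc, hcbc⟩ := List.mem_flatMap.mp hc
      have hc0 : 0 ≤ c := le_trans (hbase bc hbc) (sums_ge ts hts bc c hcbc)
      simp only [pvLe, Int.abs_eq_natAbs] at hle
      omega
    -- min(baseCosts) is a reachable cost, and m is at most it; m is at least it
    cases hbm : PySem.List.min? base (fun x => x) with
    | none =>
      rw [PySem.List.min?_eq_none_iff] at hbm
      rw [hbm] at hb0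
      exact absurd hb0 List.not_mem_nil
    | some d =>
      have hd_mem : d ∈ base := PySem.List.min?_mem hbm
      have hdS : d ∈ base.flatMap (pvSums ts) :=
        List.mem_flatMap.mpr ⟨d, hd_mem, self_mem_sums ts d⟩
      have h1 : m ≤ d := hall d hdS
      have h2 : d ≤ b0 := PySem.List.min?_isMin hbm b0 hb0
      have h3 : b0 ≤ m := sums_ge ts hts b0 m hmb0
      simp only [Option.getD_some]
      omega

-- ===== VERDICT (by name: the statement is the Claim_ definition above) =====
theorem closestCost_spec : Claim_equal_closestCost := by
  intro base ts tgt _hdom hpre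
  obtain ⟨hb, hdisj⟩ := hpre
  unfold Spec_closestCost
  -- B's min over the costs set: the lexicographic minimum m of all combination costs
  have hCne : pvCostsB base ts ≠ [] := by
    cases base with
    | nil => exact absurd rfl hb
    | cons b0 rest =>
      have hb0 : b0 ∈ pvCostsB (b0 :: rest) ts :=
        (mem_costsB _ ts b0).mpr (List.mem_flatMap.mpr ⟨b0, List.mem_cons_self, self_mem_sums ts b0⟩)
      intro h
      rw [h] at hb0
      exact absurd hb0 List.not_mem_nil
  obtain ⟨x, tl, hC⟩ := List.exists_cons_of_ne_nil hCne
  have hmin2 : PySem.List.min2? (pvCostsB base ts) (fun c => |c - tgt|) (fun c => c)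
      = some (tl.foldl (pvF tgt) x) := by
    rw [min2?_abs_eq, hC, List.foldl_cons]
    have : pvUpd tgt none x = some x := rfl
    rw [this, foldl_upd_some]
  set m := tl.foldl (pvF tgt) x with hm
  have halt : closestCost_alt base ts tgt = m := by
    unfold closestCost_alt
    rw [hmin2]
    rfl
  obtain ⟨hmem0, hlex, hall⟩ := foldl_pvF_spec tgt tl x
  have hm_mem : m ∈ base.flatMap (pvSums ts) := by
    rw [← mem_costsB, hC]
    rcases hmem0 with h | h
    · exact List.mem_cons.mpr (Or.inl (hm.trans h))
    · exact List.mem_cons.mpr (Or.inr (hm ▸ h))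
  have hm_min : ∀ c ∈ base.flatMap (pvSums ts), pvLe tgt m c := by
    intro c hc
    rw [← mem_costsB, hC, List.mem_cons] at hc
    rcases hc with rfl | hc
    · exact hlex
    · exact hall c hc
  have hsel : pvSelect base tgt m = m := by
    rcases hdisj with ⟨hbase, hts⟩ | ⟨b0, hb0, hb0lo, hb0hi⟩
    · exact select_eq_min base ts tgt m hbase hts hm_mem hm_min
    · -- some base cost lies in the scan window, hence so does the lexicographic minimum m
      have hb0S : b0 ∈ base.flatMap (pvSums ts) :=
        List.mem_flatMap.mpr ⟨b0, hb0, self_mem_sums ts b0⟩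
      have hle := hm_min b0 hb0S
      unfold pvSelect
      rw [if_pos (Or.inr (by simp only [pvLe, Int.abs_eq_natAbs] at hle; omega))]
  rw [halt, ← hsel]
  unfold closestCost
  by_cases htin : PySem.Set.contains (pvCombosA base ts) tgt = true
  · simp only [htin, if_true]
    have htL : tgt ∈ base.flatMap (pvSums ts) := by
      rw [← mem_combosA]; exact (PySem.Set.contains_iff _ _).mp htin
    have := hm_min tgt htL
    have hmt : m = tgt := by
      simp only [pvLe, Int.abs_eq_natAbs] at this; omega
    unfold pvSelect
    rw [if_pos (Or.inl hmt)]
    omega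
  · simp only [htin]
    have htL : tgt ∉ base.flatMap (pvSums ts) := by
      intro h
      exact htin ((PySem.Set.contains_iff _ _).mpr ((mem_combosA base ts _).mpr h))
    exact scanA_go base ts tgt m hm_mem hm_min htL (tgt + 1 - 1).toNat 1 (by omega) (by omega)
      (by
        have hne : m ≠ tgt := fun h => htL (h ▸ hm_mem)
        simp only [Int.abs_eq_natAbs]; omega)
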